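-- pv_equiv track=rewrite | github.com/Rohanmunoth/Bioinformatics_Algorithms | Week3/Branch_Bound_Algorithm_Cyclopeptide_Sequencing.py | numberOfPeptides
-- ===== SOURCE A (Python) =====
-- def numberOfPeptides(spectrum):
--     peptideLength=None
--     spectrumLength=len(spectrum)
--     for i in range(spectrumLength):
--         if ((i*(i-1))+2==spectrumLength):
--             peptideLength=i
--             break
--     return peptideLength
-- ===== SOURCE B (Python) =====
-- def _isqrt(n):
--     # integer square root by quartering recursion (no imports needed)
--     if n < 2:
--         return n
--     r = 2 * _isqrt(n // 4)
--     return r + 1 if (r + 1) * (r + 1) <= n else r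
--
--
-- def numberOfPeptides(spectrum):
--     # i*(i-1)+2 == n  <=>  (2i-1)^2 == 4n-7 : solve the quadratic in O(1)
--     n = len(spectrum)
--     if n < 2:
--         return None
--     d = 4 * n - 7
--     r = _isqrt(d)
--     if r * r != d:
--         return None
--     lo = (1 - r) // 2
--     return lo if lo >= 0 else (1 + r) // 2
-- ===== Notes on version B (the rewrite author's own statement) =====
-- stated objective: faster
-- what changed: Replaces A's linear scan over range(len(spectrum)) with a closed-form solution of the quadratic i*(i-1)+2 = n: compute an integer square root of 4n-7, verify it is exact, and return the smallest nonnegative root.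
import Mathlib
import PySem

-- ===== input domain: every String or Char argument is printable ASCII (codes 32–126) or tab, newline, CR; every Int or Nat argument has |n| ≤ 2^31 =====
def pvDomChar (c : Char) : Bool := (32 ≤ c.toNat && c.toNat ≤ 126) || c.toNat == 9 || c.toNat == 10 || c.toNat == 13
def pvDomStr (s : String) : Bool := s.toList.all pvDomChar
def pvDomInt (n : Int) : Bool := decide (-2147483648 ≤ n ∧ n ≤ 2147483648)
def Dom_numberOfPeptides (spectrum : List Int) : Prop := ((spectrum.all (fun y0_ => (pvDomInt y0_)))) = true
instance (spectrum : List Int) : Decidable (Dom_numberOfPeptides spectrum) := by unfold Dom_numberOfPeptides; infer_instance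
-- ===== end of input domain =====

-- B replaces A's linear scan over range(len(spectrum)) by an O(log n) closed-form
-- solution of the quadratic i*(i-1)+2 = len(spectrum) via an integer square root.

-- ===== PORT A =====
-- the 'for i in range(...): if ...: break' loop of A
def numberOfPeptidesLoop (n : Int) : List Int → Option Int
  | [] => none
  | i :: rest => if i * (i - 1) + 2 = n then some i else numberOfPeptidesLoop n rest

def numberOfPeptides (spectrum : List Int) : Option Int :=
  let spectrumLength := PySem.List.len spectrum
  numberOfPeptidesLoop spectrumLength (PySem.List.pyRange 0 spectrumLength 1)

-- ===== PORT B =====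
-- Source B's _isqrt: recursive integer square root by quartering
def isqrtB (n : Int) : Int :=
  if h : n < 2 then n
  else
    let r := 2 * isqrtB (PySem.Int.floordiv n 4)
    if (r + 1) * (r + 1) ≤ n then r + 1 else r
termination_by n.toNat
decreasing_by
  rw [PySem.Int.floordiv_eq_ediv_of_pos (by norm_num)]
  omega

def numberOfPeptides_alt (spectrum : List Int) : Option Int :=
  let n := PySem.List.len spectrum
  if n < 2 then none
  else
    let d := 4 * n - 7
    let r := isqrtB d
    if r * r ≠ d then none
    else
      let lo := PySem.Int.floordiv (1 - r) 2
      if lo ≥ 0 then some lo else some (PySem.Int.floordiv (1 + r) 2)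

-- ===== PRECONDITION & SPEC =====
def Spec_numberOfPeptides (spectrum : List Int) (out : Option Int) : Prop := out = numberOfPeptides_alt spectrum
instance (spectrum : List Int) (out : Option Int) : Decidable (Spec_numberOfPeptides spectrum out) := by unfold Spec_numberOfPeptides; infer_instance

-- ===== CLAIM (what is proved, stated in full; the proofs are below) =====
def Claim_equal_numberOfPeptides : Prop := ∀ (spectrum : List Int), Dom_numberOfPeptides spectrum → Spec_numberOfPeptides spectrum (numberOfPeptides spectrum)

-- ===== LEMMAS AND PROOFS =====

-- isqrtB is the integer square root
theorem isqrtB_spec_aux : ∀ (N : Nat) (n : Int), 0 ≤ n → n.toNat = N →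
    0 ≤ isqrtB n ∧ isqrtB n * isqrtB n ≤ n ∧ n < (isqrtB n + 1) * (isqrtB n + 1) := by
  intro N
  induction N using Nat.strong_induction_on with
  | _ N ih =>
    intro n hn hN
    rw [isqrtB]
    by_cases h : n < 2
    · rw [dif_pos h]
      have : n = 0 ∨ n = 1 := by omega
      rcases this with rfl | rfl <;> norm_num
    · rw [dif_neg h]
      have hfd : PySem.Int.floordiv n 4 = n / 4 :=
        PySem.Int.floordiv_eq_ediv_of_pos (by norm_num)
      set m := PySem.Int.floordiv n 4 with hm
      have hm0 : 0 ≤ m := by rw [hfd]; omega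
      have hml : 4 * m ≤ n ∧ n < 4 * m + 4 := by rw [hfd]; omega
      have hlt : m.toNat < N := by rw [hfd]; omega
      obtain ⟨h0, h1, h2⟩ := ih m.toNat hlt m hm0 rfl
      set r := isqrtB m with hr
      simp only
      split_ifs with hc
      · refine ⟨by omega, hc, ?_⟩
        nlinarith [hml.2, h2]
      · refine ⟨by omega, ?_, by omega⟩
        nlinarith [hml.1, h1]

theorem isqrtB_spec (n : Int) (hn : 0 ≤ n) :
    0 ≤ isqrtB n ∧ isqrtB n * isqrtB n ≤ n ∧ n < (isqrtB n + 1) * (isqrtB n + 1) :=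
  isqrtB_spec_aux n.toNat n hn rfl

-- loop returns none when no element satisfies
theorem loop_none (n : Int) (xs : List Int) (h : ∀ i ∈ xs, i * (i - 1) + 2 ≠ n) :
    numberOfPeptidesLoop n xs = none := by
  induction xs with
  | nil => rfl
  | cons a t ih =>
    have := h a (by simp)
    simp [numberOfPeptidesLoop, this]
    exact ih fun i hi => h i (by simp [hi])

-- loop returns the first satisfying element
theorem loop_first (n : Int) (xs ys : List Int) (k : Int)
    (hxs : ∀ i ∈ xs, i * (i - 1) + 2 ≠ n) (hk : k * (k - 1) + 2 = n) :
    numberOfPeptidesLoop n (xs ++ k :: ys) = some k := by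
  induction xs with
  | nil => simp [numberOfPeptidesLoop, hk]
  | cons a t ih =>
    have := hxs a (by simp)
    simp only [List.cons_append, numberOfPeptidesLoop, if_neg this]
    exact ih fun i hi => hxs i (by simp [hi])

-- A's loop over range(N) returns the first k with k*(k-1)+2 = n
theorem loop_range_some (n : Int) (N kn : Nat) (hk : kn < N)
    (hP : (kn : Int) * ((kn : Int) - 1) + 2 = n)
    (hmin : ∀ j : Nat, j < kn → (j : Int) * ((j : Int) - 1) + 2 ≠ n) :
    numberOfPeptidesLoop n ((List.range N).map (fun k : Nat => (k : Int))) = some (kn : Int) := by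
  have hsplit : N = kn + (N - kn - 1 + 1) := by omega
  rw [hsplit, List.range_add, List.range_succ_eq_map]
  simp only [List.map_append, List.map_cons, List.map_map, Nat.add_zero]
  have := loop_first n ((List.range kn).map (fun k : Nat => (k : Int)))
      (((List.range (N - kn - 1)).map Nat.succ).map (fun x => ((kn + x : Nat) : Int)))
      (kn : Int)
      (by intro i hi
          simp only [List.mem_map, List.mem_range] at hi
          obtain ⟨j, hj, rfl⟩ := hi
          exact hmin j hj)
      hP
  simpa using this

theorem loop_range_none (n : Int) (N : Nat)
    (h : ∀ j : Nat, j < N → (j : Int) * ((j : Int) - 1) + 2 ≠ n) :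
    numberOfPeptidesLoop n ((List.range N).map (fun k : Nat => (k : Int))) = none := by
  apply loop_none
  intro i hi
  simp only [List.mem_map, List.mem_range] at hi
  obtain ⟨j, hj, rfl⟩ := hi
  exact h j hj

theorem main_eq (s : List Int) : numberOfPeptides s = numberOfPeptides_alt s := by
  simp only [numberOfPeptides, numberOfPeptides_alt, PySem.List.len_eq]
  rw [PySem.List.pyRange_zero_natCast]
  generalize s.length = N
  by_cases h2 : (N : Int) < 2
  · rw [if_pos h2]
    have : N = 0 ∨ N = 1 := by omega
    rcases this with rfl | rfl <;> decide
  · rw [if_neg h2]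
    have hd0 : (0 : Int) ≤ 4 * (N : Int) - 7 := by omega
    obtain ⟨hr0, hr1, hr2⟩ := isqrtB_spec _ hd0
    set r := isqrtB (4 * (N : Int) - 7) with hrdef
    by_cases heq : r * r = 4 * (N : Int) - 7
    · rw [if_neg (not_not_intro heq)]
      -- r is odd since r*r ≡ 1 (mod 4)
      obtain ⟨t, ht⟩ : ∃ t, r = 2 * t + 1 := by
        rcases Int.even_or_odd r with ⟨t, htt⟩ | ⟨t, htt⟩
        · exfalso
          have hx : (t + t) * (t + t) = 4 * (t * t) := by ring
          rw [htt, hx] at heq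
          omega
        · exact ⟨t, htt⟩
      rw [ht] at hr0 heq ⊢
      have ht0 : 0 ≤ t := by omega
      have hkey : t * t + t + 2 = (N : Int) := by
        have hx : (2 * t + 1) * (2 * t + 1) = 4 * (t * t) + 4 * t + 1 := by ring
        rw [hx] at heq
        omega
      have hlo : PySem.Int.floordiv (1 - (2 * t + 1)) 2 = -t := by
        rw [PySem.Int.floordiv_eq_ediv_of_pos (by norm_num)]
        omega
      have hhi : PySem.Int.floordiv (1 + (2 * t + 1)) 2 = t + 1 := by
        rw [PySem.Int.floordiv_eq_ediv_of_pos (by norm_num)]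
        omega
      rw [hlo, hhi]
      by_cases ht1 : t = 0
      · subst ht1
        have hN2 : N = 2 := by exact_mod_cast hkey.symm
        subst hN2
        decide
      · rw [if_neg (by omega)]
        have htpos : 1 ≤ t := by omega
        have hc : (((t + 1).toNat : Int)) = t + 1 := Int.toNat_of_nonneg (by omega)
        have hkN : (t + 1).toNat < N := by
          have h1 : t + 1 < (N : Int) := by nlinarith [hkey]
          omega
        have := loop_range_some (N : Int) N (t + 1).toNat hkN
          (by rw [hc]; linear_combination hkey)
          (by intro j hj hcon
              have hJt : (j : Int) ≤ t := by omega
              have hJ0 : (0 : Int) ≤ (j : Int) := by positivity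
              nlinarith [hcon, hkey, mul_nonneg (sub_nonneg.mpr hJt) (by omega : (0:Int) ≤ t + (j : Int) - 1)])
        rw [this, hc]
    · rw [if_pos heq]
      apply loop_range_none
      intro j hj hcon
      by_cases hj0 : j = 0
      · subst hj0
        simp only [Nat.cast_zero] at hcon
        have hn2 : (N : Int) = 2 := by omega
        rw [hn2] at hr1 hr2
        norm_num at hr1 hr2
        have hrle : r ≤ 1 := by nlinarith
        have hrge : 1 ≤ r := by nlinarith
        have hre : r = 1 := by omega
        apply heq
        rw [hre, hn2]
        norm_num
      · have hJ1 : (1 : Int) ≤ (j : Int) := by exact_mod_cast Nat.one_le_iff_ne_zero.mpr hj0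
        have hw : (2 * (j : Int) - 1) * (2 * (j : Int) - 1) = 4 * (N : Int) - 7 := by
          linear_combination 4 * hcon
        apply heq
        have h1 : r ≤ 2 * (j : Int) - 1 := by nlinarith
        have h2' : 2 * (j : Int) - 1 ≤ r := by nlinarith
        have : r = 2 * (j : Int) - 1 := le_antisymm h1 h2'
        rw [this, hw]

-- ===== VERDICT (by name: the statement is the Claim_ definition above) =====
theorem numberOfPeptides_spec : Claim_equal_numberOfPeptides := by
  intro s _
  unfold Spec_numberOfPeptides
  exact main_eq s
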